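-- pv_equiv track=rewrite | github.com/arcadecoffee/advent-2022 | day22.py | next_position_2d
-- ===== SOURCE A (Python) =====
-- def next_position_2d(mm: list[str], r: int, c: int, f: str) -> tuple[int, int]:
--     if f == ">":
--         points = mm[r]
--         offset = c
--     elif f == "<":
--         points = "".join(reversed(mm[r]))
--         offset = len(points) - c - 1
--     elif f == "v":
--         points = "".join([m[c] for m in mm])
--         offset = r
--     else:
--         points = "".join([m[c] for m in reversed(mm)])
--         offset = len(points) - r - 1
--
--     if offset < len(points) - 1 and points[offset + 1] == ".":
--         offset = offset + 1
--     elif offset >= len(points) - 1 or points[offset + 1] == " ":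
--         for new_offset in range(offset - 1, -2, -1):
--             if new_offset < 0 or points[new_offset] == " ":
--                 if points[new_offset + 1] == ".":
--                     offset = new_offset + 1
--                 break
--
--     if f == ">":
--         return r, offset
--     elif f == "<":
--         return r, len(points) - offset - 1
--     elif f == "v":
--         return offset, c
--     else:
--         return len(points) - offset - 1, c
-- ===== SOURCE B (Python) =====
-- def next_position_2d(mm: list[str], r: int, c: int, f: str) -> tuple[int, int]:
--     # One movement engine in grid coordinates: a cell accessor along the axis of
--     # motion plus a signed step, instead of A's four oriented axis-strings.
--     if f == ">" or f == "<":
--         step = 1 if f == ">" else -1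
--         n = len(mm[r])
--         pos = c
--         cell = lambda k: mm[r][k]
--     else:
--         step = 1 if f == "v" else -1
--         n = len(mm)
--         pos = r
--         cell = lambda k: mm[k][c]
--
--     nxt = pos + step
--     if 0 <= nxt < n and cell(nxt) == ".":
--         pos = nxt
--     elif not (0 <= nxt < n) or cell(nxt) == " ":
--         # wrap: walk against the step to the first cell of the current run
--         w = pos
--         while 0 <= w - step < n and cell(w - step) != " ":
--             w -= step
--         if cell(w) == ".":
--             pos = w
--
--     return (r, pos) if f == ">" or f == "<" else (pos, c)
-- ===== Notes on version B (the rewrite author's own statement) =====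
-- stated objective: simpler
-- what changed: B replaces A's four oriented axis-strings (string reversal, column materialization and len-offset-1 re-mapping) by one movement engine working directly in grid coordinates: a cell accessor along the axis of motion plus a signed step, with a backwards walk to the start of the current run for wraparound.
-- outside the precondition, e.g. on next_position_2d(['..'], 0, -2, '>'): A returns (0, -1), B returns (0, -2); on next_position_2d(['.'], 0, -2, '>'): A returns (0, -1), B raises IndexError; on next_position_2d(['# '], 0, 2, '<'): A returns (0, 2), B raises IndexError
import Mathlib
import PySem

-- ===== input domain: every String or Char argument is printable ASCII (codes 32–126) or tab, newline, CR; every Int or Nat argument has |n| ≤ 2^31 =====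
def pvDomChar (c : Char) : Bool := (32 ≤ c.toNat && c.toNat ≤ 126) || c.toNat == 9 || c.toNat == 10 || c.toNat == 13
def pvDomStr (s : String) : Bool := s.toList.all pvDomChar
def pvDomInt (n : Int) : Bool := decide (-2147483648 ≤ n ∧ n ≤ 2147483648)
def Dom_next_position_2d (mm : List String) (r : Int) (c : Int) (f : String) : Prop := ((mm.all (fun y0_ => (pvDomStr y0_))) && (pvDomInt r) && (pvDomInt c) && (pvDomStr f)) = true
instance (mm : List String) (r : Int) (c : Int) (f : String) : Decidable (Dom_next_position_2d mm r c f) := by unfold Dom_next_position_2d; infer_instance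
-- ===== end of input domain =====

-- B replaces A's four oriented axis-strings (reversal + len-offset-1 arithmetic) by one
-- movement engine in grid coordinates: a cell accessor along the axis plus a signed step (objective: simpler).

-- shared small helpers: mm[r] as chars, and xs[i] with a default (in range wherever Pre_ holds)
def pvRow (mm : List String) (r : Int) : List Char := ((PySem.List.pyGet? mm r).getD "").toList

def pvGetC (l : List Char) (i : Int) : Char := PySem.List.pyGetD l i ' '

-- ===== PORT A =====
-- for new_offset in range(offset-1, -2, -1): … break
def pvLoopA (pts : List Char) (offset : Int) : List Int → Int
  | [] => offset
  | no :: rest =>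
    if no < 0 ∨ pvGetC pts no = ' ' then
      (if pvGetC pts (no + 1) = '.' then no + 1 else offset)
    else pvLoopA pts offset rest

-- the middle section of A: update offset along the oriented string
def pvStepA (pts : List Char) (offset : Int) : Int :=
  let n : Int := pts.length
  if offset < n - 1 ∧ pvGetC pts (offset + 1) = '.' then offset + 1
  else if offset ≥ n - 1 ∨ pvGetC pts (offset + 1) = ' ' then
    pvLoopA pts offset (PySem.List.pyRange (offset - 1) (-2) (-1))
  else offset

def next_position_2d (mm : List String) (r : Int) (c : Int) (f : String) : Int × Int :=
  let pts : List Char :=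
    if f == ">" then pvRow mm r
    else if f == "<" then (pvRow mm r).reverse
    else if f == "v" then mm.map (fun m => pvGetC m.toList c)
    else mm.reverse.map (fun m => pvGetC m.toList c)
  let offset : Int :=
    if f == ">" then c
    else if f == "<" then (pts.length : Int) - c - 1
    else if f == "v" then r
    else (pts.length : Int) - r - 1
  let offset2 := pvStepA pts offset
  if f == ">" then (r, offset2)
  else if f == "<" then (r, (pts.length : Int) - offset2 - 1)
  else if f == "v" then (offset2, c)
  else ((pts.length : Int) - offset2 - 1, c)

-- ===== PORT B =====
-- while 0 <= w - step < n and cell(w - step) != " ": w -= step      (fuel = n suffices: w moves monotonically inside [0, n))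
def pvWalkB (cell : Int → Char) (n : Int) (step : Int) : Nat → Int → Int
  | 0, w => w
  | fuel + 1, w =>
    if 0 ≤ w - step ∧ w - step < n ∧ cell (w - step) ≠ ' ' then
      pvWalkB cell n step fuel (w - step)
    else w

-- the movement engine of B on one axis
def pvMoveB (cell : Int → Char) (n : Int) (step : Int) (pos : Int) : Int :=
  let nxt := pos + step
  if 0 ≤ nxt ∧ nxt < n ∧ cell nxt = '.' then nxt
  else if ¬(0 ≤ nxt ∧ nxt < n) ∨ cell nxt = ' ' then
    let w := pvWalkB cell n step n.toNat pos
    if cell w = '.' then w else pos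
  else pos

def next_position_2d_alt (mm : List String) (r : Int) (c : Int) (f : String) : Int × Int :=
  if f == ">" || f == "<" then
    let step : Int := if f == ">" then 1 else -1
    (r, pvMoveB (fun k => pvGetC (pvRow mm r) k) ((pvRow mm r).length : Int) step c)
  else
    let step : Int := if f == "v" then 1 else -1
    (pvMoveB (fun k => pvGetC (pvRow mm k) c) (mm.length : Int) step r, c)

-- ===== PRECONDITION & SPEC =====
-- Pre_ keeps every input whose moving coordinate is in range or one step past either end (-1 or
-- axis length, where both programs still read the same cells), with the fixed coordinate readable
-- by every access both programs make (a negative fixed index reads the same wrapped row/column in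
-- A and B and stays inside the claim).  It excludes inputs where A raises IndexError (out-of-range
-- indices, ragged rows on vertical moves, a past-the-end start next to a space cell) and the deeper
-- out-of-range corners (moving coordinate <= -2) where A's returned position comes from Python's
-- accidental negative-index wraparound: there B raises or returns a different position.
def Pre_next_position_2d (mm : List String) (r : Int) (c : Int) (f : String) : Prop :=
  (f = ">" →
    PySem.Raise.InRange mm.length r ∧
    ((0 ≤ c ∧ c < (pvRow mm r).length) ∨ (c = -1 ∧ 1 ≤ (pvRow mm r).length) ∨
      (c = ((pvRow mm r).length : Int) ∧ 1 ≤ (pvRow mm r).length ∧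
        pvGetC (pvRow mm r) (((pvRow mm r).length : Int) - 1) ≠ ' '))) ∧
  (f = "<" →
    PySem.Raise.InRange mm.length r ∧
    ((0 ≤ c ∧ c < (pvRow mm r).length) ∨
      (c = -1 ∧ 1 ≤ (pvRow mm r).length ∧ pvGetC (pvRow mm r) 0 ≠ ' ') ∨
      (c = ((pvRow mm r).length : Int) ∧ 1 ≤ (pvRow mm r).length ∧
        pvGetC (pvRow mm r) (((pvRow mm r).length : Int) - 1) ≠ ' '))) ∧
  (f = "v" →
    (∀ m ∈ mm, PySem.Raise.InRange m.toList.length c) ∧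
    ((0 ≤ r ∧ r < mm.length) ∨ (r = -1 ∧ 1 ≤ mm.length) ∨
      (r = (mm.length : Int) ∧ 1 ≤ mm.length ∧
        pvGetC (pvRow mm ((mm.length : Int) - 1)) c ≠ ' '))) ∧
  (¬(f = ">" ∨ f = "<" ∨ f = "v") →
    (∀ m ∈ mm, PySem.Raise.InRange m.toList.length c) ∧
    ((0 ≤ r ∧ r < mm.length) ∨
      (r = -1 ∧ 1 ≤ mm.length ∧ pvGetC (pvRow mm 0) c ≠ ' ') ∨
      (r = (mm.length : Int) ∧ 1 ≤ mm.length ∧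
        pvGetC (pvRow mm ((mm.length : Int) - 1)) c ≠ ' ')))
instance (mm : List String) (r : Int) (c : Int) (f : String) : Decidable (Pre_next_position_2d mm r c f) := by
  unfold Pre_next_position_2d
  refine @instDecidableAnd _ _ ?_ (@instDecidableAnd _ _ ?_ (@instDecidableAnd _ _ ?_ ?_)) <;>
    infer_instance

def pvWitness_next_position_2d : List String × Int × Int × String := (["..#", ".#."], 0, 1, ">")

def Spec_next_position_2d (mm : List String) (r : Int) (c : Int) (f : String) (out : Int × Int) : Prop := out = next_position_2d_alt mm r c f
instance (mm : List String) (r : Int) (c : Int) (f : String) (out : Int × Int) : Decidable (Spec_next_position_2d mm r c f out) := by unfold Spec_next_position_2d; infer_instance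

-- ===== CLAIM (what is proved, stated in full; the proofs are below) =====
def Claim_equal_next_position_2d : Prop := ∀ (mm : List String) (r : Int) (c : Int) (f : String), Dom_next_position_2d mm r c f → Pre_next_position_2d mm r c f → Spec_next_position_2d mm r c f (next_position_2d mm r c f)

-- ===== LEMMAS AND PROOFS =====

-- pvGetC in range is plain getElem
theorem pvGetC_eq_getElem (l : List Char) (i : Int) (h0 : 0 ≤ i) (h1 : i < l.length) :
    pvGetC l i = l[i.toNat]'(by omega) := by
  simpa [pvGetC] using PySem.List.pyGetD_eq_getElem l ' ' h0 h1

theorem pvGetC_reverse (l : List Char) (k : Int) (h0 : 0 ≤ k) (h1 : k < l.length) :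
    pvGetC l.reverse k = pvGetC l ((l.length : Int) - 1 - k) := by
  rw [pvGetC_eq_getElem _ _ (by omega) (by simpa using h1),
      pvGetC_eq_getElem _ _ (by omega) (by omega)]
  rw [List.getElem_reverse]
  congr 1
  omega

-- the wrap scans agree: A's range loop from offset-1 = B's backwards walk from w (step 1)
theorem loop_eq_walk (pts : List Char) (cell : Int → Char)
    (hcell : ∀ k : Int, 0 ≤ k → k < pts.length → cell k = pvGetC pts k) :
    ∀ (fuel : Nat) (off0 w : Int), w.toNat ≤ fuel →
    ((0 ≤ w ∧ w < pts.length) ∨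
      (w = (pts.length : Int) ∧ 1 ≤ pts.length ∧ cell ((pts.length : Int) - 1) ≠ ' ')) →
    pvLoopA pts off0 (PySem.List.pyRange (w - 1) (-2) (-1)) =
      (if cell (pvWalkB cell (pts.length : Int) 1 fuel w) = '.'
       then pvWalkB cell (pts.length : Int) 1 fuel w else off0) := by
  intro fuel
  induction fuel with
  | zero =>
    intro off0 w hf hw
    have h0 : 0 ≤ w := by rcases hw with ⟨h, _⟩ | ⟨h, hn, _⟩ <;> omega
    have h1 : w < (pts.length : Int) := by rcases hw with ⟨_, h⟩ | ⟨h, hn, _⟩ <;> omega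
    have hw : w = 0 := by omega
    subst hw
    rw [PySem.List.pyRange_neg_one_cons (by omega : (-2 : Int) < 0 - 1),
        PySem.List.pyRange_neg_one_eq_nil (by omega : (0 : Int) - 1 - 1 ≤ -2)]
    show (if (0 : Int) - 1 < 0 ∨ pvGetC pts (0 - 1) = ' '
          then (if pvGetC pts ((0 : Int) - 1 + 1) = '.' then (0 : Int) - 1 + 1 else off0) else pvLoopA pts off0 [])
        = if cell (pvWalkB cell (pts.length : Int) 1 0 0) = '.' then pvWalkB cell (pts.length : Int) 1 0 0 else off0
    rw [if_pos (Or.inl (by omega))]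
    have : ((0 : Int) - 1 + 1) = 0 := by ring
    rw [this]
    simp only [pvWalkB]
    rw [hcell 0 (by omega) (by omega)]
  | succ fuel ih =>
    intro off0 w hf hw
    have h0 : 0 ≤ w := by rcases hw with ⟨h, _⟩ | ⟨h, hn, _⟩ <;> omega
    have hwalk : pvWalkB cell (pts.length : Int) 1 (fuel + 1) w
        = if 0 ≤ w - 1 ∧ w - 1 < (pts.length : Int) ∧ cell (w - 1) ≠ ' '
          then pvWalkB cell (pts.length : Int) 1 fuel (w - 1) else w := rfl
    by_cases hC : 0 ≤ w - 1 ∧ w - 1 < (pts.length : Int) ∧ cell (w - 1) ≠ ' '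
    · -- loop continues
      rw [PySem.List.pyRange_neg_one_cons (by omega : (-2 : Int) < w - 1)]
      show (if w - 1 < 0 ∨ pvGetC pts (w - 1) = ' '
            then (if pvGetC pts (w - 1 + 1) = '.' then w - 1 + 1 else off0)
            else pvLoopA pts off0 (PySem.List.pyRange (w - 1 - 1) (-2) (-1)))
          = if cell (pvWalkB cell (pts.length : Int) 1 (fuel + 1) w) = '.'
            then pvWalkB cell (pts.length : Int) 1 (fuel + 1) w else off0
      rw [if_neg (by
        rintro (h | h)
        · omega
        · exact hC.2.2 (by rw [hcell (w - 1) (by omega) (by omega)]; exact h))]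
      rw [hwalk, if_pos hC]
      have : w - 1 - 1 = (w - 1) - 1 := rfl
      exact ih off0 (w - 1) (by omega) (Or.inl ⟨by omega, by omega⟩)
    · -- loop stops at w-1 (edge or space); walk returns w
      have h1 : w < (pts.length : Int) := by
        rcases hw with ⟨_, h⟩ | ⟨heq, hn, hedge⟩
        · exact h
        · exact absurd ⟨by omega, by omega, by rw [show w - 1 = (pts.length : Int) - 1 by omega]; exact hedge⟩ hC
      rw [hwalk, if_neg hC]
      have hstop : w - 1 < 0 ∨ pvGetC pts (w - 1) = ' ' := by
        by_cases hw0 : w = 0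
        · exact Or.inl (by omega)
        · right
          have h2 : ¬ cell (w - 1) ≠ ' ' := by
            intro hne; exact hC ⟨by omega, by omega, hne⟩
          rw [← hcell (w - 1) (by omega) (by omega)]
          simpa using h2
      rw [PySem.List.pyRange_neg_one_cons (by omega : (-2 : Int) < w - 1)]
      show (if w - 1 < 0 ∨ pvGetC pts (w - 1) = ' '
            then (if pvGetC pts (w - 1 + 1) = '.' then w - 1 + 1 else off0)
            else pvLoopA pts off0 (PySem.List.pyRange (w - 1 - 1) (-2) (-1)))
          = if cell w = '.' then w else off0
      rw [if_pos hstop]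
      have : w - 1 + 1 = w := by ring
      rw [this, hcell w h0 h1]

-- forward core: A on the oriented list, step +1 = B's engine
theorem stepA_eq_moveB_fwd (pts : List Char) (cell : Int → Char) (off : Int)
    (hoff : (0 ≤ off ∧ off < pts.length) ∨ (off = -1 ∧ 1 ≤ pts.length) ∨
      (off = (pts.length : Int) ∧ 1 ≤ pts.length ∧ pvGetC pts ((pts.length : Int) - 1) ≠ ' '))
    (hcell : ∀ k : Int, 0 ≤ k → k < pts.length → cell k = pvGetC pts k) :
    pvStepA pts off = pvMoveB cell (pts.length : Int) 1 off := by
  show (if off < (pts.length : Int) - 1 ∧ pvGetC pts (off + 1) = '.' then off + 1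
        else if off ≥ (pts.length : Int) - 1 ∨ pvGetC pts (off + 1) = ' ' then
          pvLoopA pts off (PySem.List.pyRange (off - 1) (-2) (-1))
        else off)
      = if 0 ≤ off + 1 ∧ off + 1 < (pts.length : Int) ∧ cell (off + 1) = '.' then off + 1
        else if ¬(0 ≤ off + 1 ∧ off + 1 < (pts.length : Int)) ∨ cell (off + 1) = ' ' then
          (if cell (pvWalkB cell (pts.length : Int) 1 (pts.length : Int).toNat off) = '.'
           then pvWalkB cell (pts.length : Int) 1 (pts.length : Int).toNat off else off)
        else off
  rcases hoff with ⟨h0, h1⟩ | ⟨hoff, hn⟩ | ⟨hoff, hn, hedge⟩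
  case inr.inl =>
    -- off = -1: A's backtrack range is empty; B's walk stays at -1 and any '.'-test result is -1
    subst hoff
    have hc := hcell 0 (by omega) (by omega)
    have e1 : (-1 : Int) + 1 = 0 := by norm_num
    rw [e1]
    by_cases hdot : pvGetC pts 0 = '.'
    · rw [if_pos (show (-1 : Int) < (pts.length : Int) - 1 ∧ pvGetC pts 0 = '.' from ⟨by omega, hdot⟩),
          if_pos (show 0 ≤ (0 : Int) ∧ (0 : Int) < (pts.length : Int) ∧ cell 0 = '.' from
            ⟨le_refl _, by omega, by rw [hc]; exact hdot⟩)]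
    · rw [if_neg (show ¬((-1 : Int) < (pts.length : Int) - 1 ∧ pvGetC pts 0 = '.') from
            fun h => hdot h.2),
          if_neg (show ¬(0 ≤ (0 : Int) ∧ (0 : Int) < (pts.length : Int) ∧ cell 0 = '.') from
            fun h => hdot (by rw [← hc]; exact h.2.2))]
      have hwalk : pvWalkB cell (pts.length : Int) 1 (pts.length : Int).toNat (-1) = -1 := by
        obtain ⟨k, hk⟩ : ∃ k, (pts.length : Int).toNat = k + 1 := ⟨(pts.length : Int).toNat - 1, by omega⟩
        rw [hk]
        show (if 0 ≤ (-1 : Int) - 1 ∧ (-1 : Int) - 1 < (pts.length : Int) ∧ cell ((-1 : Int) - 1) ≠ ' '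
              then pvWalkB cell (pts.length : Int) 1 k ((-1 : Int) - 1) else -1) = -1
        rw [if_neg (by rintro ⟨h, -, -⟩; omega)]
      by_cases hsp : pvGetC pts 0 = ' '
      · rw [if_pos (show (-1 : Int) ≥ (pts.length : Int) - 1 ∨ pvGetC pts 0 = ' ' from Or.inr hsp),
            if_pos (show ¬(0 ≤ (0 : Int) ∧ (0 : Int) < (pts.length : Int)) ∨ cell 0 = ' ' from
              Or.inr (by rw [hc]; exact hsp)),
            PySem.List.pyRange_neg_one_eq_nil (by omega : (-1 : Int) - 1 ≤ -2), hwalk]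
        show pvLoopA pts (-1) [] = if cell (-1) = '.' then (-1 : Int) else -1
        rw [ite_self]
        rfl
      · rw [if_neg (show ¬((-1 : Int) ≥ (pts.length : Int) - 1 ∨ pvGetC pts 0 = ' ') from by
              rintro (h | h)
              · omega
              · exact hsp h),
            if_neg (show ¬(¬(0 ≤ (0 : Int) ∧ (0 : Int) < (pts.length : Int)) ∨ cell 0 = ' ') from by
              rintro (h | h)
              · exact h ⟨le_refl _, by omega⟩
              · exact hsp (by rw [← hc]; exact h))]
  case inr.inr =>
    -- off = n: A's condition 1 is vacuous, both sides run the wrap scan from n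
    subst hoff
    have hloop := loop_eq_walk pts cell hcell (pts.length : Int).toNat (pts.length : Int)
      (pts.length : Int) (by omega)
      (Or.inr ⟨rfl, hn, by rw [hcell ((pts.length : Int) - 1) (by omega) (by omega)]; exact hedge⟩)
    rw [if_neg (show ¬((pts.length : Int) < (pts.length : Int) - 1 ∧
          pvGetC pts ((pts.length : Int) + 1) = '.') from fun h => by omega),
        if_neg (show ¬(0 ≤ (pts.length : Int) + 1 ∧ (pts.length : Int) + 1 < (pts.length : Int) ∧
          cell ((pts.length : Int) + 1) = '.') from fun h => by omega),
        if_pos (show (pts.length : Int) ≥ (pts.length : Int) - 1 ∨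
          pvGetC pts ((pts.length : Int) + 1) = ' ' from Or.inl (by omega)),
        if_pos (show ¬(0 ≤ (pts.length : Int) + 1 ∧ (pts.length : Int) + 1 < (pts.length : Int)) ∨
          cell ((pts.length : Int) + 1) = ' ' from Or.inl (fun h => by omega)),
        hloop]
  have hloop := loop_eq_walk pts cell hcell (pts.length : Int).toNat off off (by omega)
    (Or.inl ⟨h0, h1⟩)
  by_cases hin : off + 1 < (pts.length : Int)
  · have hc := hcell (off + 1) (by omega) hin
    by_cases hdot : pvGetC pts (off + 1) = '.'
    · rw [if_pos (show off < (pts.length : Int) - 1 ∧ pvGetC pts (off + 1) = '.' from ⟨by omega, hdot⟩),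
          if_pos (show 0 ≤ off + 1 ∧ off + 1 < (pts.length : Int) ∧ cell (off + 1) = '.' from
            ⟨by omega, hin, by rw [hc]; exact hdot⟩)]
    · rw [if_neg (show ¬(off < (pts.length : Int) - 1 ∧ pvGetC pts (off + 1) = '.') from
            fun h => hdot h.2),
          if_neg (show ¬(0 ≤ off + 1 ∧ off + 1 < (pts.length : Int) ∧ cell (off + 1) = '.') from
            fun h => hdot (by rw [← hc]; exact h.2.2))]
      by_cases hsp : pvGetC pts (off + 1) = ' '
      · rw [if_pos (show off ≥ (pts.length : Int) - 1 ∨ pvGetC pts (off + 1) = ' ' from Or.inr hsp),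
            if_pos (show ¬(0 ≤ off + 1 ∧ off + 1 < (pts.length : Int)) ∨ cell (off + 1) = ' ' from
              Or.inr (by rw [hc]; exact hsp)),
            hloop]
      · rw [if_neg (show ¬(off ≥ (pts.length : Int) - 1 ∨ pvGetC pts (off + 1) = ' ') from by
              rintro (h | h)
              · omega
              · exact hsp h),
            if_neg (show ¬(¬(0 ≤ off + 1 ∧ off + 1 < (pts.length : Int)) ∨ cell (off + 1) = ' ') from by
              rintro (h | h)
              · exact h ⟨by omega, hin⟩
              · exact hsp (by rw [← hc]; exact h))]
  · rw [if_neg (show ¬(off < (pts.length : Int) - 1 ∧ pvGetC pts (off + 1) = '.') from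
          fun h => by omega),
        if_neg (show ¬(0 ≤ off + 1 ∧ off + 1 < (pts.length : Int) ∧ cell (off + 1) = '.') from
          fun h => hin h.2.1),
        if_pos (show off ≥ (pts.length : Int) - 1 ∨ pvGetC pts (off + 1) = ' ' from Or.inl (by omega)),
        if_pos (show ¬(0 ≤ off + 1 ∧ off + 1 < (pts.length : Int)) ∨ cell (off + 1) = ' ' from
          Or.inl (fun h => hin h.2)),
        hloop]

-- pure flip symmetry of B's walk
theorem walkB_flip (cell : Int → Char) (n : Int) :
    ∀ (fuel : Nat) (w : Int),
    pvWalkB (fun k => cell (n - 1 - k)) n 1 fuel (n - 1 - w) = n - 1 - pvWalkB cell n (-1) fuel w := by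
  intro fuel
  induction fuel with
  | zero => intro w; simp [pvWalkB]
  | succ fuel ih =>
    intro w
    show (if 0 ≤ (n - 1 - w) - 1 ∧ (n - 1 - w) - 1 < n ∧ cell (n - 1 - ((n - 1 - w) - 1)) ≠ ' '
          then pvWalkB (fun k => cell (n - 1 - k)) n 1 fuel ((n - 1 - w) - 1) else n - 1 - w)
        = n - 1 - (if 0 ≤ w - (-1) ∧ w - (-1) < n ∧ cell (w - (-1)) ≠ ' '
          then pvWalkB cell n (-1) fuel (w - (-1)) else w)
    have he : n - 1 - ((n - 1 - w) - 1) = w - (-1) := by ring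
    rw [he]
    by_cases h : 0 ≤ w - (-1) ∧ w - (-1) < n ∧ cell (w - (-1)) ≠ ' '
    · rw [if_pos ⟨by omega, by omega, h.2.2⟩, if_pos h]
      have he2 : (n - 1 - w) - 1 = n - 1 - (w - (-1)) := by ring
      rw [he2]
      exact ih (w - (-1))
    · have h' : ¬(0 ≤ (n - 1 - w) - 1 ∧ (n - 1 - w) - 1 < n ∧ cell (w - (-1)) ≠ ' ') := by
        intro ⟨a, b, cch⟩; exact h ⟨by omega, by omega, cch⟩
      rw [if_neg h', if_neg h]

-- pure flip symmetry of B's engine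
theorem moveB_flip (cell : Int → Char) (n pos : Int) :
    pvMoveB cell n (-1) pos = n - 1 - pvMoveB (fun k => cell (n - 1 - k)) n 1 (n - 1 - pos) := by
  show (if 0 ≤ pos + (-1) ∧ pos + (-1) < n ∧ cell (pos + (-1)) = '.' then pos + (-1)
        else if ¬(0 ≤ pos + (-1) ∧ pos + (-1) < n) ∨ cell (pos + (-1)) = ' ' then
          (if cell (pvWalkB cell n (-1) n.toNat pos) = '.' then pvWalkB cell n (-1) n.toNat pos else pos)
        else pos)
      = n - 1 - (if 0 ≤ (n - 1 - pos) + 1 ∧ (n - 1 - pos) + 1 < n ∧ cell (n - 1 - ((n - 1 - pos) + 1)) = '.' then (n - 1 - pos) + 1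
        else if ¬(0 ≤ (n - 1 - pos) + 1 ∧ (n - 1 - pos) + 1 < n) ∨ cell (n - 1 - ((n - 1 - pos) + 1)) = ' ' then
          (if cell (n - 1 - (pvWalkB (fun k => cell (n - 1 - k)) n 1 n.toNat (n - 1 - pos))) = '.'
           then pvWalkB (fun k => cell (n - 1 - k)) n 1 n.toNat (n - 1 - pos) else n - 1 - pos)
        else n - 1 - pos)
  have he : n - 1 - ((n - 1 - pos) + 1) = pos + (-1) := by ring
  rw [he, walkB_flip cell n n.toNat pos]
  have he2 : n - 1 - (n - 1 - pvWalkB cell n (-1) n.toNat pos) = pvWalkB cell n (-1) n.toNat pos := by ring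
  rw [he2]
  by_cases h1 : 0 ≤ pos + (-1) ∧ pos + (-1) < n ∧ cell (pos + (-1)) = '.'
  · rw [if_pos h1, if_pos ⟨by omega, by omega, h1.2.2⟩]; ring
  · have h1' : ¬(0 ≤ (n - 1 - pos) + 1 ∧ (n - 1 - pos) + 1 < n ∧ cell (pos + (-1)) = '.') := by
      intro ⟨a, b, cch⟩; exact h1 ⟨by omega, by omega, cch⟩
    rw [if_neg h1, if_neg h1']
    by_cases h2 : ¬(0 ≤ pos + (-1) ∧ pos + (-1) < n) ∨ cell (pos + (-1)) = ' '
    · have h2' : ¬(0 ≤ (n - 1 - pos) + 1 ∧ (n - 1 - pos) + 1 < n) ∨ cell (pos + (-1)) = ' ' := by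
        rcases h2 with h2 | h2
        · exact Or.inl (by intro ⟨a, b⟩; exact h2 ⟨by omega, by omega⟩)
        · exact Or.inr h2
      rw [if_pos h2, if_pos h2']
      by_cases h3 : cell (pvWalkB cell n (-1) n.toNat pos) = '.'
      · rw [if_pos h3, if_pos h3]; ring
      · rw [if_neg h3, if_neg h3]; ring
    · have h2' : ¬(¬(0 ≤ (n - 1 - pos) + 1 ∧ (n - 1 - pos) + 1 < n) ∨ cell (pos + (-1)) = ' ') := by
        push Not at h2 ⊢
        exact ⟨⟨by omega, by omega⟩, h2.2⟩
      rw [if_neg h2, if_neg h2']; ring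

-- reverse core: A on the reversed list = n-1 - B's engine with step -1
theorem stepA_eq_moveB_rev (pts : List Char) (cell : Int → Char) (pos : Int)
    (hpos : (0 ≤ pos ∧ pos < pts.length) ∨ (pos = -1 ∧ 1 ≤ pts.length ∧ pvGetC pts 0 ≠ ' ') ∨
      (pos = (pts.length : Int) ∧ 1 ≤ pts.length))
    (hcell : ∀ k : Int, 0 ≤ k → k < pts.length → cell k = pvGetC pts k) :
    pvStepA pts.reverse ((pts.length : Int) - 1 - pos) =
      (pts.length : Int) - 1 - pvMoveB cell (pts.length : Int) (-1) pos := by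
  have hlen : ((pts.reverse.length : Int)) = (pts.length : Int) := by simp
  have hrevlen : ((pts.reverse.length : Nat) : Int) = ((pts.length : Nat) : Int) := by simp
  have hoff : (0 ≤ (pts.length : Int) - 1 - pos ∧ (pts.length : Int) - 1 - pos < pts.reverse.length) ∨
      (((pts.length : Int) - 1 - pos = -1) ∧ 1 ≤ pts.reverse.length) ∨
      ((pts.length : Int) - 1 - pos = (pts.reverse.length : Int) ∧ 1 ≤ pts.reverse.length ∧
        pvGetC pts.reverse ((pts.reverse.length : Int) - 1) ≠ ' ') := by
    rcases hpos with ⟨h0, h1⟩ | ⟨hp, hn, hedge⟩ | ⟨hp, hn⟩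
    · exact Or.inl ⟨by omega, by rw [hrevlen]; omega⟩
    · refine Or.inr (Or.inr ⟨by rw [hrevlen]; omega, by simpa using hn, ?_⟩)
      rw [hrevlen, pvGetC_reverse pts ((pts.length : Int) - 1) (by omega) (by omega)]
      rw [show (pts.length : Int) - 1 - ((pts.length : Int) - 1) = 0 by ring]
      exact hedge
    · exact Or.inr (Or.inl ⟨by omega, by simpa using hn⟩)
  have hfwd := stepA_eq_moveB_fwd pts.reverse (fun k => cell ((pts.length : Int) - 1 - k))
    ((pts.length : Int) - 1 - pos) hoff
    (by
      intro k hk0 hk1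
      rw [hlen] at hk1
      show cell ((pts.length : Int) - 1 - k) = pvGetC pts.reverse k
      rw [hcell ((pts.length : Int) - 1 - k) (by omega) (by omega)]
      rw [pvGetC_reverse pts k hk0 hk1])
  rw [hfwd, hlen, moveB_flip cell (pts.length : Int) pos]
  ring

-- ===== VERDICT (by name: the statement is the Claim_ definition above) =====
-- cell agreement for the vertical cases: the mapped column vs B's row accessor
theorem hcell_col (mm : List String) (c : Int) :
    ∀ k : Int, 0 ≤ k → k < ((mm.map (fun m => pvGetC m.toList c)).length : Int) →
      (fun k => pvGetC (pvRow mm k) c) k = pvGetC (mm.map (fun m => pvGetC m.toList c)) k := by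
  intro k hk0 hk1
  simp only [List.length_map] at hk1
  rw [pvGetC_eq_getElem _ k hk0 (by simpa using hk1)]
  simp only [List.getElem_map]
  show pvGetC (pvRow mm k) c = _
  rw [pvRow, PySem.List.pyGet?_eq_some_getElem mm hk0 hk1]
  rfl

theorem next_position_2d_spec : Claim_equal_next_position_2d := by
  intro mm r c f hdom hpre
  obtain ⟨hpgt, hplt, hpv, hpup⟩ := hpre
  show next_position_2d mm r c f = next_position_2d_alt mm r c f
  by_cases hgt : f = ">"
  · subst hgt
    obtain ⟨-, hc⟩ := hpgt rfl
    have key := stepA_eq_moveB_fwd (pvRow mm r) (fun k => pvGetC (pvRow mm r) k) c hc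
      (fun _ _ _ => rfl)
    have hA : next_position_2d mm r c ">" = (r, pvStepA (pvRow mm r) c) := by
      simp [next_position_2d]
    have hB : next_position_2d_alt mm r c ">"
        = (r, pvMoveB (fun k => pvGetC (pvRow mm r) k) ((pvRow mm r).length : Int) 1 c) := by
      simp [next_position_2d_alt]
    rw [hA, hB, key]
  · by_cases hlt : f = "<"
    · subst hlt
      obtain ⟨-, hc⟩ := hplt rfl
      have hc' : (0 ≤ c ∧ c < (pvRow mm r).length) ∨
          (c = -1 ∧ 1 ≤ (pvRow mm r).length ∧ pvGetC (pvRow mm r) 0 ≠ ' ') ∨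
          (c = ((pvRow mm r).length : Int) ∧ 1 ≤ (pvRow mm r).length) := by
        rcases hc with h | h | ⟨a, b, -⟩
        · exact Or.inl h
        · exact Or.inr (Or.inl h)
        · exact Or.inr (Or.inr ⟨a, b⟩)
      have key := stepA_eq_moveB_rev (pvRow mm r) (fun k => pvGetC (pvRow mm r) k) c hc'
        (fun _ _ _ => rfl)
      have hA : next_position_2d mm r c "<"
          = (r, ((pvRow mm r).length : Int)
              - pvStepA ((pvRow mm r).reverse) (((pvRow mm r).length : Int) - c - 1) - 1) := by
        simp [next_position_2d]
      have hB : next_position_2d_alt mm r c "<"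
          = (r, pvMoveB (fun k => pvGetC (pvRow mm r) k) ((pvRow mm r).length : Int) (-1) c) := by
        simp [next_position_2d_alt]
      have harg : ((pvRow mm r).length : Int) - c - 1 = ((pvRow mm r).length : Int) - 1 - c := by
        ring
      rw [hA, hB, harg, key]
      simp only [Prod.mk.injEq]
      exact ⟨trivial, by ring⟩
    · have hne1 : (f == ">") = false := by simpa using hgt
      have hne2 : (f == "<") = false := by simpa using hlt
      have hcell := hcell_col mm c
      have hlen0 : ((mm.map (fun m => pvGetC m.toList c)).length : Nat) = mm.length :=
        List.length_map ..
      by_cases hv : f = "v"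
      · subst hv
        obtain ⟨-, hr⟩ := hpv rfl
        have hr' : (0 ≤ r ∧ r < (mm.map (fun m => pvGetC m.toList c)).length) ∨
            (r = -1 ∧ 1 ≤ (mm.map (fun m => pvGetC m.toList c)).length) ∨
            (r = ((mm.map (fun m => pvGetC m.toList c)).length : Int) ∧
              1 ≤ (mm.map (fun m => pvGetC m.toList c)).length ∧
              pvGetC (mm.map (fun m => pvGetC m.toList c))
                (((mm.map (fun m => pvGetC m.toList c)).length : Int) - 1) ≠ ' ') := by
          rcases hr with ⟨a, b⟩ | ⟨a, b⟩ | ⟨a, b, hedge⟩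
          · exact Or.inl ⟨a, by rw [hlen0]; exact b⟩
          · exact Or.inr (Or.inl ⟨a, by rw [hlen0]; exact b⟩)
          · refine Or.inr (Or.inr ⟨by rw [hlen0]; exact a, by rw [hlen0]; exact b, ?_⟩)
            rw [show (((mm.map (fun m => pvGetC m.toList c)).length : Nat) : Int) - 1
                = (mm.length : Int) - 1 by rw [hlen0]]
            rw [← hcell ((mm.length : Int) - 1) (by omega) (by rw [hlen0]; omega)]
            exact hedge
        obtain ⟨pts, hpts⟩ : ∃ l, l = mm.map (fun m => pvGetC m.toList c) := ⟨_, rfl⟩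
        rw [← hpts] at hcell hr'
        have hlen : ((pts.length : Nat) : Int) = ((mm.length : Nat) : Int) := by
          rw [hpts]; simp
        have key := stepA_eq_moveB_fwd pts (fun k => pvGetC (pvRow mm k) c) r hr' hcell
        have hA : next_position_2d mm r c "v"
            = (pvStepA (mm.map (fun m => pvGetC m.toList c)) r, c) := by
          simp [next_position_2d]
        have hB : next_position_2d_alt mm r c "v"
            = (pvMoveB (fun k => pvGetC (pvRow mm k) c) ((mm.length : Nat) : Int) 1 r, c) := by
          simp [next_position_2d_alt]
        rw [hA, hB, ← hpts, key, hlen]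
      · have hne3 : (f == "v") = false := by simpa using hv
        obtain ⟨-, hr⟩ := hpup (by rintro (h | h | h) <;> simp_all)
        have hr' : (0 ≤ r ∧ r < (mm.map (fun m => pvGetC m.toList c)).length) ∨
            (r = -1 ∧ 1 ≤ (mm.map (fun m => pvGetC m.toList c)).length ∧
              pvGetC (mm.map (fun m => pvGetC m.toList c)) 0 ≠ ' ') ∨
            (r = ((mm.map (fun m => pvGetC m.toList c)).length : Int) ∧
              1 ≤ (mm.map (fun m => pvGetC m.toList c)).length) := by
          rcases hr with ⟨a, b⟩ | ⟨a, b, hedge⟩ | ⟨a, b, -⟩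
          · exact Or.inl ⟨a, by rw [hlen0]; exact b⟩
          · refine Or.inr (Or.inl ⟨a, by rw [hlen0]; exact b, ?_⟩)
            rw [← hcell 0 (by omega) (by rw [hlen0]; omega)]
            exact hedge
          · exact Or.inr (Or.inr ⟨by rw [hlen0]; exact a, by rw [hlen0]; exact b⟩)
        obtain ⟨pts, hpts⟩ : ∃ l, l = mm.map (fun m => pvGetC m.toList c) := ⟨_, rfl⟩
        rw [← hpts] at hcell hr'
        have hlen : ((pts.length : Nat) : Int) = ((mm.length : Nat) : Int) := by
          rw [hpts]; simp
        have key := stepA_eq_moveB_rev pts (fun k => pvGetC (pvRow mm k) c) r hr' hcell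
        have hA : next_position_2d mm r c f
            = (((mm.length : Nat) : Int)
                - pvStepA ((mm.map (fun m => pvGetC m.toList c)).reverse)
                    (((mm.length : Nat) : Int) - r - 1) - 1, c) := by
          simp [next_position_2d, hne1, hne2, hne3]
        have hB : next_position_2d_alt mm r c f
            = (pvMoveB (fun k => pvGetC (pvRow mm k) c) ((mm.length : Nat) : Int) (-1) r, c) := by
          simp [next_position_2d_alt, hne1, hne2, hne3]
        have harg : ((pts.length : Nat) : Int) - r - 1 = ((pts.length : Nat) : Int) - 1 - r := by
          ring
        rw [hA, hB, ← hpts, ← hlen, harg, key]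
        simp only [Prod.mk.injEq]
        exact ⟨by ring, trivial⟩
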